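-- pv_equiv track=rewrite | github.com/barteksmolkowski/150-funkcji-w-praktyce | 150_metod/11-20_zadan.py | sort_by_row
-- ===== SOURCE A (Python) =====
-- def sort_by_row(lista):
--     def sort(lst):
--         for i in range(len(lst)):
--             for j in range(len(lst) - 1):
--                 if lst[j] > lst[j + 1]:
--                     zmiana = lst[j]
--                     lst[j] = lst[j + 1]
--                     lst[j + 1] = zmiana
--         return lst
--
--     n_lista = []
--     for i in range(len(lista)):
--         n_lista.append(sort(lista[i]))
--     return n_lista
-- ===== SOURCE B (Python) =====
-- def sort_by_row(lista):
--     # Insertion sort per row, building a fresh sorted list (does not mutate the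
--     # input sublists, unlike A; the return value is identical).
--     result = []
--     for row in lista:
--         srt = []
--         for x in row:
--             k = 0
--             while k < len(srt) and srt[k] <= x:
--                 k += 1
--             srt.insert(k, x)
--         result.append(srt)
--     return result
-- ===== Notes on version B (the rewrite author's own statement) =====
-- stated objective: faster
-- what changed: Each row is sorted by insertion sort into a fresh list instead of A's n full bubble-sort passes of adjacent swaps in place; B does not mutate the input sublists.
import Mathlib
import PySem

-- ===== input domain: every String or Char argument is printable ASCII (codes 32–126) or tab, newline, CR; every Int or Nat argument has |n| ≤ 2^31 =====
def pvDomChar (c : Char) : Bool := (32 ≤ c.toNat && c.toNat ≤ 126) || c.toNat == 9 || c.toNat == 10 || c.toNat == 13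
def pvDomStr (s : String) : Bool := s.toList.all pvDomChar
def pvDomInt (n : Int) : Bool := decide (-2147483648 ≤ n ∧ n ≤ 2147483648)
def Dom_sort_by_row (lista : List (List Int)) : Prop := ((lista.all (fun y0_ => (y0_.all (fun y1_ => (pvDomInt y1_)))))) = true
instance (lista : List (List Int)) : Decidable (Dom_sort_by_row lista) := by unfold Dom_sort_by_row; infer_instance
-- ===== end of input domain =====

-- B sorts each row by insertion into a fresh list instead of A's in-place bubble
-- passes; A mutates its input sublists, B does not — the equivalence proved here
-- is about the return value.

-- ===== PORT A =====
-- inner `if lst[j] > lst[j+1]: swap` — indices j, j+1 are always in range here,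
-- so List.getElem?/List.set are exact
def swapStepA (l : List Int) (j : Nat) : List Int :=
  match l[j]?, l[j + 1]? with
  | some a, some b => if a > b then (l.set j b).set (j + 1) a else l
  | _, _ => l

-- one pass of `for j in range(len(lst) - 1)`
def bubblePassA (lst : List Int) : List Int :=
  (List.range (lst.length - 1)).foldl swapStepA lst

-- `sort`: `for i in range(len(lst))` repeats the pass (i unused)
def sortA (lst : List Int) : List Int :=
  (List.range lst.length).foldl (fun l _ => bubblePassA l) lst

-- `for i in range(len(lista)): n_lista.append(sort(lista[i]))` — i in range, getD exact
def sort_by_row (lista : List (List Int)) : List (List Int) :=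
  (List.range lista.length).foldl (fun acc i => acc ++ [sortA (lista.getD i [])]) []

-- ===== PORT B =====
-- `k = 0; while k < len(srt) and srt[k] <= x: k += 1; srt.insert(k, x)`
def insB (x : Int) : List Int → List Int
  | [] => [x]
  | y :: t => if y ≤ x then y :: insB x t else x :: y :: t

-- `srt = []; for x in row: insert` then `result.append(srt)`
def sort_by_row_alt (lista : List (List Int)) : List (List Int) :=
  lista.map (fun row => row.foldl (fun srt x => insB x srt) [])

-- ===== PRECONDITION & SPEC =====
def Spec_sort_by_row (lista : List (List Int)) (out : List (List Int)) : Prop := out = sort_by_row_alt lista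
instance (lista : List (List Int)) (out : List (List Int)) : Decidable (Spec_sort_by_row lista out) := by unfold Spec_sort_by_row; infer_instance

-- ===== CLAIM (what is proved, stated in full; the proofs are below) =====
def Claim_equal_sort_by_row : Prop := ∀ (lista : List (List Int)), Dom_sort_by_row lista → Spec_sort_by_row lista (sort_by_row lista)

-- ===== LEMMAS AND PROOFS =====

-- recursive reformulation of one bubble pass
def bp : List Int → List Int
  | [] => []
  | [a] => [a]
  | a :: b :: t => if a > b then b :: bp (a :: t) else a :: bp (b :: t)

theorem swapStepA_cons (x : Int) (l : List Int) (j : Nat) :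
    swapStepA (x :: l) (j + 1) = x :: swapStepA l j := by
  simp only [swapStepA, List.getElem?_cons_succ]
  cases h1 : l[j]? <;> cases h2 : l[j + 1]? <;> simp [List.set]
  split <;> rfl

theorem swapStepA_zero (a b : Int) (t : List Int) :
    swapStepA (a :: b :: t) 0 = if a > b then b :: a :: t else a :: b :: t := by
  simp [swapStepA, List.set]

theorem foldl_swap_map_succ (r : List Nat) : ∀ (x : Int) (l : List Int),
    (r.map Nat.succ).foldl swapStepA (x :: l) = x :: r.foldl swapStepA l := by
  induction r with
  | nil => intro x l; rfl
  | cons j r ih =>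
    intro x l
    simp only [List.map_cons, List.foldl_cons, Nat.succ_eq_add_one, swapStepA_cons]
    exact ih x _

theorem bubblePassA_eq_bp (l : List Int) : bubblePassA l = bp l := by
  induction l using bp.induct with
  | case1 => simp [bubblePassA, bp]
  | case2 a => simp [bubblePassA, bp]
  | case3 a b t h ih =>
    simp only [bubblePassA, List.length_cons, Nat.add_sub_cancel, List.range_succ_eq_map,
      List.foldl_cons, swapStepA_zero, if_pos h]
    rw [foldl_swap_map_succ, bp, if_pos h]
    simpa [bubblePassA, List.length_cons, Nat.add_sub_cancel] using ih
  | case4 a b t h ih =>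
    simp only [bubblePassA, List.length_cons, Nat.add_sub_cancel, List.range_succ_eq_map,
      List.foldl_cons, swapStepA_zero, if_neg h]
    rw [foldl_swap_map_succ, bp, if_neg h]
    simpa [bubblePassA, List.length_cons, Nat.add_sub_cancel] using ih

theorem bp_perm (l : List Int) : (bp l).Perm l := by
  induction l using bp.induct with
  | case1 => simp [bp]
  | case2 a => simp [bp]
  | case3 a b t h ih =>
    rw [bp, if_pos h]
    exact (ih.cons b).trans (List.Perm.swap a b t)
  | case4 a b t h ih =>
    rw [bp, if_neg h]
    exact ih.cons a

theorem bp_max (a : Int) (t : List Int) :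
    ∃ f m, bp (a :: t) = f ++ [m] ∧ ∀ x ∈ a :: t, x ≤ m := by
  induction t generalizing a with
  | nil => exact ⟨[], a, by simp [bp], by simp⟩
  | cons b t ih =>
    by_cases h : a > b
    · obtain ⟨f, m, hf, hm⟩ := ih a
      refine ⟨b :: f, m, by rw [bp, if_pos h, hf]; rfl, ?_⟩
      intro x hx
      have ham : a ≤ m := hm a (by simp)
      simp only [List.mem_cons] at hx
      rcases hx with rfl | rfl | hx
      · exact ham
      · exact le_trans (le_of_lt h) ham
      · exact hm x (by simp [hx])
    · obtain ⟨f, m, hf, hm⟩ := ih b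
      refine ⟨a :: f, m, by rw [bp, if_neg h, hf]; rfl, ?_⟩
      intro x hx
      have hbm : b ≤ m := hm b (by simp)
      simp only [List.mem_cons] at hx
      rcases hx with rfl | rfl | hx
      · exact le_trans (le_of_not_gt h) hbm
      · exact hbm
      · exact hm x (by simp [hx])

theorem bp_append_max (m : Int) (l : List Int) (hm : ∀ x ∈ l, x ≤ m) :
    bp (l ++ [m]) = bp l ++ [m] := by
  induction l using bp.induct with
  | case1 => simp [bp]
  | case2 a =>
    have : ¬ a > m := not_lt.2 (hm a (by simp))
    simp [bp, this]
  | case3 a b t h ih =>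
    have := ih (fun x hx => hm x (by simp only [List.mem_cons] at hx ⊢; tauto))
    rw [List.cons_append, List.cons_append, bp, if_pos h, bp, if_pos h]
    rw [← List.cons_append, this]
    rfl
  | case4 a b t h ih =>
    have := ih (fun x hx => hm x (by simp only [List.mem_cons] at hx ⊢; tauto))
    rw [List.cons_append, List.cons_append, bp, if_neg h, bp, if_neg h]
    rw [← List.cons_append, this]
    rfl

theorem bp_iter_perm (k : Nat) (l : List Int) : (bp^[k] l).Perm l := by
  induction k generalizing l with
  | zero => rfl
  | succ k ih => rw [Function.iterate_succ_apply]; exact (ih (bp l)).trans (bp_perm l)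

theorem bp_iter_append_max (k : Nat) (m : Int) (l : List Int) (hm : ∀ x ∈ l, x ≤ m) :
    bp^[k] (l ++ [m]) = bp^[k] l ++ [m] := by
  induction k generalizing l with
  | zero => rfl
  | succ k ih =>
    rw [Function.iterate_succ_apply, Function.iterate_succ_apply, bp_append_max m l hm]
    exact ih (bp l) (fun x hx => hm x ((bp_perm l).mem_iff.1 hx))

theorem bp_iter_sorted : ∀ (n : Nat) (l : List Int), l.length = n →
    List.Pairwise (· ≤ ·) (bp^[n] l) := by
  intro n
  induction n with
  | zero => intro l h; rw [List.length_eq_zero_iff.1 h]; exact List.Pairwise.nil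
  | succ n ih =>
    intro l h
    match l, h with
    | a :: t, h =>
      obtain ⟨f, m, hf, hm⟩ := bp_max a t
      have hlen : f.length = n := by
        have := (bp_perm (a :: t)).length_eq
        rw [hf] at this
        simp at this h
        omega
      have hfm : ∀ x ∈ f, x ≤ m := by
        intro x hx
        exact hm x ((bp_perm (a :: t)).mem_iff.1 (by rw [hf]; simp [hx]))
      rw [Function.iterate_succ_apply, hf, bp_iter_append_max n m f hfm]
      rw [List.pairwise_append]
      refine ⟨ih f hlen, List.pairwise_singleton _ _, ?_⟩
      intro x hx y hy
      simp only [List.mem_singleton] at hy; subst hy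
      exact hfm x ((bp_iter_perm n f).mem_iff.1 hx)

theorem sortA_eq_iter (l : List Int) : sortA l = bp^[l.length] l := by
  have key : ∀ (n : Nat) (l : List Int),
      (List.range n).foldl (fun l _ => bubblePassA l) l = bp^[n] l := by
    intro n
    induction n with
    | zero => intro l; rfl
    | succ n ih =>
      intro l
      rw [List.range_succ, List.foldl_append, ih, Function.iterate_succ_apply']
      simp [bubblePassA_eq_bp]
  exact key l.length l

theorem sortA_sorted (l : List Int) : List.Pairwise (· ≤ ·) (sortA l) := by
  rw [sortA_eq_iter]; exact bp_iter_sorted l.length l rfl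

theorem sortA_perm (l : List Int) : (sortA l).Perm l := by
  rw [sortA_eq_iter]; exact bp_iter_perm l.length l

theorem insB_perm (x : Int) (l : List Int) : (insB x l).Perm (x :: l) := by
  induction l with
  | nil => rfl
  | cons y t ih =>
    by_cases h : y ≤ x
    · rw [insB, if_pos h]
      exact (ih.cons y).trans (List.Perm.swap x y t)
    · rw [insB, if_neg h]

theorem insB_sorted (x : Int) (l : List Int) (h : List.Pairwise (· ≤ ·) l) :
    List.Pairwise (· ≤ ·) (insB x l) := by
  induction l with
  | nil => exact List.pairwise_singleton _ _
  | cons y t ih =>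
    rw [List.pairwise_cons] at h
    by_cases hyx : y ≤ x
    · rw [insB, if_pos hyx, List.pairwise_cons]
      refine ⟨?_, ih h.2⟩
      intro b hb
      rcases List.mem_cons.1 ((insB_perm x t).mem_iff.1 hb) with rfl | hb
      · exact hyx
      · exact h.1 b hb
    · rw [insB, if_neg hyx, List.pairwise_cons]
      refine ⟨?_, by rw [List.pairwise_cons]; exact h⟩
      intro b hb
      simp only [List.mem_cons] at hb
      rcases hb with rfl | hb
      · exact le_of_not_ge hyx
      · exact le_trans (le_of_not_ge hyx) (h.1 b hb)

def insRow (row : List Int) : List Int := row.foldl (fun srt x => insB x srt) []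

theorem insRow_sorted (row : List Int) : List.Pairwise (· ≤ ·) (insRow row) := by
  have key : ∀ (row s : List Int), List.Pairwise (· ≤ ·) s →
      List.Pairwise (· ≤ ·) (row.foldl (fun srt x => insB x srt) s) := by
    intro row
    induction row with
    | nil => intro s hs; exact hs
    | cons x t ih => intro s hs; exact ih (insB x s) (insB_sorted x s hs)
  exact key row [] List.Pairwise.nil

theorem insRow_perm (row : List Int) : (insRow row).Perm row := by
  have key : ∀ (row s : List Int),
      (row.foldl (fun srt x => insB x srt) s).Perm (s ++ row) := by
    intro row
    induction row with
    | nil => intro s; simp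
    | cons x t ih =>
      intro s
      simp only [List.foldl_cons]
      refine (ih (insB x s)).trans ?_
      refine (List.Perm.append_right t (insB_perm x s)).trans ?_
      exact (List.perm_middle).symm
  simpa using key row []

theorem sortA_eq_insRow (row : List Int) : sortA row = insRow row := by
  exact List.Perm.eq_of_pairwise (fun a b _ _ h1 h2 => le_antisymm h1 h2)
    (sortA_sorted row) (insRow_sorted row) ((sortA_perm row).trans (insRow_perm row).symm)

theorem foldl_range_append {β : Type} (g : Nat → β) :
    ∀ (r : List Nat) (acc : List β), r.foldl (fun acc i => acc ++ [g i]) acc = acc ++ r.map g := by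
  intro r
  induction r with
  | nil => simp
  | cons j r ih => intro acc; simp [ih]

theorem map_range_getD {α β : Type} (f : α → β) (d : α) :
    ∀ (l : List α), (List.range l.length).map (fun i => f (l.getD i d)) = l.map f := by
  intro l
  induction l with
  | nil => simp
  | cons x t ih =>
    simp only [List.length_cons, List.range_succ_eq_map, List.map_cons, List.map_map,
      List.getD_cons_zero, Function.comp_def, List.getD_cons_succ]
    rw [ih]

-- ===== VERDICT (by name: the statement is the Claim_ definition above) =====
theorem sort_by_row_spec : Claim_equal_sort_by_row := by
  intro lista _
  unfold Spec_sort_by_row sort_by_row sort_by_row_alt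
  rw [foldl_range_append, List.nil_append, map_range_getD sortA ([] : List Int) lista]
  exact List.map_congr_left (fun row _ => sortA_eq_insRow row)
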